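-- pv_equiv track=rewrite | github.com/xinyiqin/lightx2v | lightx2v/common/ops/attn/draft_attn.py | build_grid_gather_index_and_bucket_fast
-- ===== SOURCE A (Python) =====
-- def build_grid_gather_index_and_bucket_fast(H, W, pool_h, pool_w, seqlen):
--     Gh = (H + pool_h - 1) // pool_h
--     Gw = (W + pool_w - 1) // pool_w
--
--     # Single frame
--     gather_single = []
--     bucket_sizes_single = []
--
--     for gh in range(Gh):
--         h0 = gh * pool_h
--         h1 = min(h0 + pool_h, H)
--         block_h = h1 - h0
--
--         for gw in range(Gw):
--             w0 = gw * pool_w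
--             w1 = min(w0 + pool_w, W)
--             block_w = w1 - w0
--
--             # bucket size
--             bucket_size = block_h * block_w
--             bucket_sizes_single.append(bucket_size)
--
--             # gather index
--             for i in range(h0, h1):
--                 row_base = i * W
--                 for j in range(w0, w1):
--                     gather_single.append(row_base + j)
--
--     bucket_sizes = []
--     bucket_offsets = [0]
--     running = 0
--     # bucket + offsets
--     for sz in bucket_sizes_single:
--         bucket_sizes.append(sz)
--         running += sz
--         bucket_offsets.append(running)
--
--     frame_num = seqlen // (H * W)
--     gather_index = []
--     for f in range(frame_num):
--         frame_base = f * H * W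
--         # index
--         gather_index.extend(idx + frame_base for idx in gather_single)
--
--     return gather_index, bucket_sizes, bucket_offsets
-- ===== SOURCE B (Python) =====
-- def build_grid_gather_index_and_bucket_fast(H, W, pool_h, pool_w, seqlen):
--     Gh = (H + pool_h - 1) // pool_h
--     Gw = (W + pool_w - 1) // pool_w
--
--     if Gh <= 0 or Gw <= 0:
--         # degenerate grid: no cells, nothing to gather
--         return [], [], [0]
--
--     # Pixel-major pass: drop each pixel into its bucket's bin.
--     bins = [[] for _ in range(Gh * Gw)]
--     for i in range(H):
--         base = i * W
--         row_bin = (i // pool_h) * Gw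
--         for j in range(W):
--             bins[row_bin + j // pool_w].append(base + j)
--
--     # Flatten bins in bucket order; sizes and offsets come from the bins.
--     gather_single = []
--     bucket_sizes = []
--     bucket_offsets = [0]
--     for b in bins:
--         gather_single.extend(b)
--         bucket_sizes.append(len(b))
--         bucket_offsets.append(bucket_offsets[-1] + len(b))
--
--     frame_num = seqlen // (H * W)
--     gather_index = [idx + f * H * W for f in range(frame_num) for idx in gather_single]
--     return gather_index, bucket_sizes, bucket_offsets
-- ===== Notes on version B (the rewrite author's own statement) =====
-- stated objective: alternative
-- what changed: Replaces A's block-major nested enumeration (loop over grid cells, then over each cell's pixels) by a single pixel-major pass that drops each pixel index into a per-bucket bin (with an early return for a degenerate empty grid), then flattens the bins to get the gather order, sizes and offsets in one scan.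
-- outside the precondition, e.g. on build_grid_gather_index_and_bucket_fast(1, 1, -1, -1, 1): A returns ([], [1], [0, 1]), B returns ([0], [1], [0, 1])
import Mathlib
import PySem

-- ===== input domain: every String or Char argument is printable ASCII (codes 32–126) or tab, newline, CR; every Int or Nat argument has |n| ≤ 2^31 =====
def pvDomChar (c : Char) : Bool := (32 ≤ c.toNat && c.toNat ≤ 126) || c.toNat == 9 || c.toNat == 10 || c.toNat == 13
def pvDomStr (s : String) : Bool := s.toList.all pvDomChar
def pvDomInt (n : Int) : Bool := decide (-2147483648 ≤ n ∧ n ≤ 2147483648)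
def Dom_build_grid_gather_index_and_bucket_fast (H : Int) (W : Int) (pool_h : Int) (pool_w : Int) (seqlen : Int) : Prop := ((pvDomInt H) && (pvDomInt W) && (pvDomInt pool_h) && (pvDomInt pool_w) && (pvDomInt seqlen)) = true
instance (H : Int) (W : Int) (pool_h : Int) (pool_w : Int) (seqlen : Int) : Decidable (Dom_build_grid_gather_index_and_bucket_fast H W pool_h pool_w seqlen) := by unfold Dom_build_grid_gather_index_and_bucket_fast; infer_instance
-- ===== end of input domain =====

-- B replaces A's block-major nested enumeration by a pixel-major pass into per-bucket
-- bins that are then flattened (alternative decomposition, same asymptotic cost).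


-- ===== PORT A =====
def build_grid_gather_index_and_bucket_fast (H : Int) (W : Int) (pool_h : Int) (pool_w : Int) (seqlen : Int) : List Int × List Int × List Int :=
  let Gh := PySem.Int.floordiv (H + pool_h - 1) pool_h
  let Gw := PySem.Int.floordiv (W + pool_w - 1) pool_w
  let gs := (PySem.List.pyRange 0 Gh 1).foldl (fun (st : List Int × List Int) gh =>
      let h0 := gh * pool_h
      let h1 := min (h0 + pool_h) H
      let block_h := h1 - h0
      (PySem.List.pyRange 0 Gw 1).foldl (fun (st : List Int × List Int) gw =>
        let w0 := gw * pool_w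
        let w1 := min (w0 + pool_w) W
        let block_w := w1 - w0
        let st := (st.1, st.2 ++ [block_h * block_w])
        (PySem.List.pyRange h0 h1 1).foldl (fun (st : List Int × List Int) i =>
          let row_base := i * W
          ((PySem.List.pyRange w0 w1 1).foldl (fun g j => g ++ [row_base + j]) st.1, st.2)) st) st)
    ([], [])
  let gather_single := gs.1
  let bucket_sizes_single := gs.2
  let so := bucket_sizes_single.foldl (fun (st : List Int × List Int × Int) sz =>
      (st.1 ++ [sz], st.2.1 ++ [st.2.2 + sz], st.2.2 + sz)) ([], [0], 0)
  let bucket_sizes := so.1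
  let bucket_offsets := so.2.1
  let frame_num := PySem.Int.floordiv seqlen (H * W)
  let gather_index := (PySem.List.pyRange 0 frame_num 1).foldl (fun acc f =>
      let frame_base := f * H * W
      acc ++ gather_single.map (fun idx => idx + frame_base)) []
  (gather_index, bucket_sizes, bucket_offsets)

-- ===== PORT B =====
def build_grid_gather_index_and_bucket_fast_alt (H : Int) (W : Int) (pool_h : Int) (pool_w : Int) (seqlen : Int) : List Int × List Int × List Int :=
  let Gh := PySem.Int.floordiv (H + pool_h - 1) pool_h
  let Gw := PySem.Int.floordiv (W + pool_w - 1) pool_w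
  if Gh ≤ 0 ∨ Gw ≤ 0 then ([], [], [0]) else
  let bins0 : List (List Int) := (PySem.List.pyRange 0 (Gh * Gw) 1).map (fun _ => [])
  let bins := (PySem.List.pyRange 0 H 1).foldl (fun bins i =>
      let base := i * W
      let row_bin := PySem.Int.floordiv i pool_h * Gw
      (PySem.List.pyRange 0 W 1).foldl (fun bins j =>
        let k := row_bin + PySem.Int.floordiv j pool_w
        PySem.List.pySetD bins k (PySem.List.pyGetD bins k [] ++ [base + j])) bins) bins0
  let st := bins.foldl (fun (st : List Int × List Int × List Int) b =>
      (st.1 ++ b, st.2.1 ++ [(b.length : Int)],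
       st.2.2 ++ [PySem.List.pyGetD st.2.2 (-1) 0 + (b.length : Int)])) ([], [], [0])
  let gather_single := st.1
  let bucket_sizes := st.2.1
  let bucket_offsets := st.2.2
  let frame_num := PySem.Int.floordiv seqlen (H * W)
  let gather_index := (PySem.List.pyRange 0 frame_num 1).flatMap (fun f =>
      gather_single.map (fun idx => idx + f * H * W))
  (gather_index, bucket_sizes, bucket_offsets)

-- ===== PRECONDITION & SPEC =====
-- Pre_ covers the natural domain of positive image and pool dimensions, plus the degenerate
-- inputs on which the pooled grid is empty (the second disjunct states, sign case by sign
-- case, that ceil(H/pool_h) ≤ 0 or ceil(W/pool_w) ≤ 0, where A returns ([], [], [0])).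
-- Excluded: inputs where A raises ZeroDivisionError (pool_h = 0, pool_w = 0, or H*W = 0),
-- and mixed-sign inputs with a nonempty grid but no pixels, where A's positive "bucket
-- sizes" alongside an empty gather list are artefacts of its loop arithmetic.
def Pre_build_grid_gather_index_and_bucket_fast (H : Int) (W : Int) (pool_h : Int) (pool_w : Int) (seqlen : Int) : Prop :=
  (1 ≤ H ∧ 1 ≤ W ∧ 1 ≤ pool_h ∧ 1 ≤ pool_w) ∨
  (H ≠ 0 ∧ W ≠ 0 ∧ pool_h ≠ 0 ∧ pool_w ≠ 0 ∧
    (((1 ≤ pool_h ∧ H ≤ 0) ∨ (pool_h ≤ -1 ∧ 2 ≤ H)) ∨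
     ((1 ≤ pool_w ∧ W ≤ 0) ∨ (pool_w ≤ -1 ∧ 2 ≤ W))))
instance (H : Int) (W : Int) (pool_h : Int) (pool_w : Int) (seqlen : Int) : Decidable (Pre_build_grid_gather_index_and_bucket_fast H W pool_h pool_w seqlen) := by unfold Pre_build_grid_gather_index_and_bucket_fast; infer_instance

def pvWitness_build_grid_gather_index_and_bucket_fast : Int × Int × Int × Int × Int := (4, 5, 2, 3, 60)

def Spec_build_grid_gather_index_and_bucket_fast (H : Int) (W : Int) (pool_h : Int) (pool_w : Int) (seqlen : Int) (out : List Int × List Int × List Int) : Prop := out = build_grid_gather_index_and_bucket_fast_alt H W pool_h pool_w seqlen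
instance (H : Int) (W : Int) (pool_h : Int) (pool_w : Int) (seqlen : Int) (out : List Int × List Int × List Int) : Decidable (Spec_build_grid_gather_index_and_bucket_fast H W pool_h pool_w seqlen out) := by unfold Spec_build_grid_gather_index_and_bucket_fast; infer_instance

-- ===== CLAIM (what is proved, stated in full; the proofs are below) =====
def Claim_equal_build_grid_gather_index_and_bucket_fast : Prop := ∀ (H : Int) (W : Int) (pool_h : Int) (pool_w : Int) (seqlen : Int), Dom_build_grid_gather_index_and_bucket_fast H W pool_h pool_w seqlen → Pre_build_grid_gather_index_and_bucket_fast H W pool_h pool_w seqlen → Spec_build_grid_gather_index_and_bucket_fast H W pool_h pool_w seqlen (build_grid_gather_index_and_bucket_fast H W pool_h pool_w seqlen)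

-- ===== LEMMAS AND PROOFS =====

def pvBlock (H W ph pw gh gw : Int) : List Int :=
  (PySem.List.pyRange (gh * ph) (min (gh * ph + ph) H) 1).flatMap (fun i =>
    (PySem.List.pyRange (gw * pw) (min (gw * pw + pw) W) 1).map (fun j => i * W + j))

def pvScan : List Int → Int → List Int
  | [], _ => []
  | a :: l, r => (r + a) :: pvScan l (r + a)

theorem pvOffsetsFold (szs : List Int) : ∀ (s o : List Int) (r : Int),
    szs.foldl (fun (st : List Int × List Int × Int) sz =>
      (st.1 ++ [sz], st.2.1 ++ [st.2.2 + sz], st.2.2 + sz)) (s, o, r)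
    = (s ++ szs, o ++ pvScan szs r, r + szs.sum) := by
  induction szs with
  | nil => intro s o r; simp [pvScan]
  | cons a l ih =>
    intro s o r
    simp only [List.foldl_cons, ih, pvScan, List.sum_cons]
    simp [add_assoc]

theorem pvBinsFold (bins : List (List Int)) : ∀ (g s o : List Int) (r : Int),
    PySem.List.pyGetD o (-1) 0 = r →
    bins.foldl (fun (st : List Int × List Int × List Int) b =>
      (st.1 ++ b, st.2.1 ++ [(b.length : Int)],
       st.2.2 ++ [PySem.List.pyGetD st.2.2 (-1) 0 + (b.length : Int)])) (g, s, o)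
    = (g ++ bins.flatten, s ++ bins.map (fun b => (b.length : Int)),
       o ++ pvScan (bins.map (fun b => (b.length : Int))) r) := by
  induction bins with
  | nil => intro g s o r _; simp [pvScan]
  | cons b bins ih =>
    intro g s o r hr
    simp only [List.foldl_cons, hr]
    rw [ih (g ++ b) (s ++ [(b.length : Int)]) (o ++ [r + (b.length : Int)]) (r + (b.length : Int))
      (PySem.List.pyGetD_neg_one_append_singleton _ _ _)]
    simp [pvScan]

theorem pvPairFold {α : Type} (l : List α) (F : (List Int × List Int) → α → (List Int × List Int))
    (g h : α → List Int) (hF : ∀ st x, F st x = (st.1 ++ g x, st.2 ++ h x)) :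
    ∀ st : List Int × List Int, l.foldl F st = (st.1 ++ l.flatMap g, st.2 ++ l.flatMap h) := by
  induction l with
  | nil => intro st; simp
  | cons x l ih => intro st; simp only [List.foldl_cons, hF, ih, List.flatMap_cons]; simp

theorem pvBucketFold {α : Type} (key : α → Int) (val : α → Int) (xs : List α) :
    ∀ (bs : List (List Int)), (∀ x ∈ xs, 0 ≤ key x ∧ key x < (bs.length : Int)) →
    xs.foldl (fun bs x => PySem.List.pySetD bs (key x)
        (PySem.List.pyGetD bs (key x) [] ++ [val x])) bs
    = bs.mapIdx (fun b l => l ++ ((xs.filter (fun x => decide (key x = (b : Int)))).map val)) := by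
  induction xs with
  | nil =>
    intro bs _
    apply List.ext_getElem
    · simp
    intro b h1 h2
    rw [List.getElem_mapIdx]
    simp
  | cons x xs ih =>
    intro bs hb
    have hx := hb x (List.mem_cons_self)
    have hlen : (key x).toNat < bs.length := by omega
    simp only [List.foldl_cons]
    rw [PySem.List.pySetD_of_nonneg _ _ hx.1, PySem.List.pyGetD_eq_getElem _ _ hx.1 (by simpa using hx.2)]
    rw [ih _ (by intro y hy; simpa using (hb y (List.mem_cons_of_mem _ hy)))]
    apply List.ext_getElem
    · simp
    intro b h1 h2
    rw [List.getElem_mapIdx, List.getElem_mapIdx]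
    simp only [List.length_set] at h1 h2 ⊢
    rw [List.getElem_set]
    by_cases hbk : (key x).toNat = b
    · subst hbk
      have : (decide (key x = ((key x).toNat : Int))) = true := by simp [Int.toNat_of_nonneg hx.1]
      simp [List.filter_cons, this, Int.toNat_of_nonneg hx.1]
    · have : (decide (key x = (b : Int))) = false := by
        simp only [decide_eq_false_iff_not]
        intro hcontra; apply hbk; omega
      simp [List.filter_cons, this, hbk]

theorem pvFilterDiv (q c : Int) (hq : 0 < q) (hc : 0 ≤ c) : ∀ (m : Nat),
    (PySem.List.pyRange 0 (m : Int) 1).filter (fun x => decide (PySem.Int.floordiv x q = c))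
    = PySem.List.pyRange (c * q) (min (c * q + q) (m : Int)) 1 := by
  have hcq : 0 ≤ c * q := by positivity
  intro m
  induction m with
  | zero =>
    rw [PySem.List.pyRange_one_eq_nil (by simp), PySem.List.pyRange_one_eq_nil (by omega)]
    rfl
  | succ m ih =>
    have hcast : ((m + 1 : Nat) : Int) = (m : Int) + 1 := by push_cast; ring
    rw [hcast, PySem.List.pyRange_one_succ_right (by positivity), List.filter_append, ih]
    by_cases h : PySem.Int.floordiv (m : Int) q = c
    · have hb := (PySem.Int.floordiv_eq_iff_of_pos hq).mp h
      have h1 : min (c * q + q) ((m : Int) + 1) = (m : Int) + 1 := by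
        rw [min_eq_right]; nlinarith [hb.2]
      have h2 : min (c * q + q) (m : Int) = (m : Int) := by
        rw [min_eq_right]; nlinarith [hb.2]
      rw [h1, h2, PySem.List.pyRange_one_succ_right (by nlinarith [hb.1])]
      simp [h]
    · have hb : ¬ (c * q ≤ (m : Int) ∧ (m : Int) < (c+1) * q) := by
        intro hcon; exact h ((PySem.Int.floordiv_eq_iff_of_pos hq).mpr (by constructor <;> nlinarith [hcon.1, hcon.2]))
      have hcases : (m : Int) < c * q ∨ c * q + q ≤ (m : Int) := by
        by_contra hcon
        push_neg at hcon
        exact hb ⟨hcon.1, by nlinarith [hcon.2]⟩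
      rcases hcases with hlt | hge
      · have e1 : min (c * q + q) ((m : Int)) ≤ c * q := le_trans (min_le_right _ _) (by linarith)
        have e2 : min (c * q + q) ((m : Int) + 1) ≤ c * q := le_trans (min_le_right _ _) (by linarith)
        rw [PySem.List.pyRange_one_eq_nil e1, PySem.List.pyRange_one_eq_nil e2]
        simp [h]
      · have h1 : min (c * q + q) ((m : Int) + 1) = c * q + q := by rw [min_eq_left]; linarith
        have h2 : min (c * q + q) (m : Int) = c * q + q := by rw [min_eq_left]; linarith
        rw [h1, h2]
        simp [h]

theorem pvGridUnique (G a c r s : Int) (hr : 0 ≤ r) (hr2 : r < G) (hs : 0 ≤ s) (hs2 : s < G) :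
    (a * G + r = c * G + s) ↔ (a = c ∧ r = s) := by
  constructor
  · intro h
    rcases lt_trichotomy a c with h1 | h1 | h1
    · exfalso; nlinarith
    · exact ⟨h1, by subst h1; omega⟩
    · exfalso; nlinarith
  · rintro ⟨rfl, rfl⟩; rfl

theorem pvFlatMapIf {α : Type} (l : List α) (p : α → Bool) (g : α → List Int) :
    l.flatMap (fun x => if p x then g x else []) = (l.filter p).flatMap g := by
  induction l with
  | nil => rfl
  | cons x l ih =>
    by_cases h : p x <;> simp [List.flatMap_cons, h, ih]

theorem pvGridNat (m k : Nat) (f : Nat → Nat → List Int) :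
    (List.range m).flatMap (fun a => (List.range k).map (f a))
    = (List.range (m * k)).map (fun t => f (t / k) (t % k)) := by
  induction m with
  | zero => simp
  | succ m ih =>
    rcases Nat.eq_zero_or_pos k with hk | hk
    · subst hk; simp
    rw [List.range_succ, List.flatMap_append, ih, Nat.succ_mul, List.range_add, List.map_append]
    congr 1
    · simp only [List.flatMap_cons, List.flatMap_nil, List.append_nil, List.map_map]
      apply List.map_congr_left
      intro t ht
      simp only [List.mem_range] at ht
      have h1 : (m * k + t) / k = m := by
        rw [Nat.add_comm, Nat.add_mul_div_right _ _ hk, Nat.div_eq_of_lt ht]; omega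
      have h2 : (m * k + t) % k = t := by
        rw [Nat.add_comm, Nat.add_mul_mod_self_right]; exact Nat.mod_eq_of_lt ht
      simp [h1, h2]

theorem pvFlattenFlatMap {α : Type} (l : List α) (g : α → List (List Int)) :
    (l.flatMap g).flatten = l.flatMap (fun x => (g x).flatten) := by
  induction l with
  | nil => rfl
  | cons x l ih => simp [List.flatMap_cons, ih]

theorem pvFilterDiv' (q c n : Int) (hq : 0 < q) (hc : 0 ≤ c) (hn : 0 ≤ n) :
    (PySem.List.pyRange 0 n 1).filter (fun x => decide (PySem.Int.floordiv x q = c))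
    = PySem.List.pyRange (c * q) (min (c * q + q) n) 1 := by
  have h := pvFilterDiv q c hq hc n.toNat
  rwa [Int.toNat_of_nonneg hn] at h

theorem pvPyRangeZero (n : Int) : PySem.List.pyRange 0 n 1 = (List.range n.toNat).map (fun k : Nat => (k : Int)) := by
  simp [PySem.List.pyRange_one, ← List.map_eq_flatMap]

theorem pvFloordivNeg (a b : Int) (hb : b < 0) :
    PySem.Int.floordiv a b = PySem.Int.floordiv (-a) (-b) := by
  have h1 := PySem.Int.floordiv_mul_add_mod a b
  have h2 := PySem.Int.mod_neg_bounds (a := a) hb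
  have h3 : (0 : Int) < -b := by omega
  symm
  rw [PySem.Int.floordiv_eq_iff_of_pos h3]
  constructor <;> nlinarith [h1, h2.1, h2.2]

theorem pvAEmptyCase (H W ph pw s : Int)
    (h : PySem.Int.floordiv (H + ph - 1) ph ≤ 0 ∨ PySem.Int.floordiv (W + pw - 1) pw ≤ 0) :
    build_grid_gather_index_and_bucket_fast H W ph pw s = ([], [], [0]) := by
  simp only [build_grid_gather_index_and_bucket_fast]
  rcases h with h | h
  · rw [PySem.List.pyRange_one_eq_nil h]
    simp [PySem.List.foldl_ignore]
  · rw [PySem.List.pyRange_one_eq_nil h]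
    simp [PySem.List.foldl_ignore]

theorem pvEquiv (H W ph pw s : Int) (hH : 1 ≤ H) (hW : 1 ≤ W) (hph : 1 ≤ ph) (hpw : 1 ≤ pw) :
    build_grid_gather_index_and_bucket_fast H W ph pw s
    = build_grid_gather_index_and_bucket_fast_alt H W ph pw s := by
  have hph0 : (0 : Int) < ph := by omega
  have hpw0 : (0 : Int) < pw := by omega
  simp only [build_grid_gather_index_and_bucket_fast, build_grid_gather_index_and_bucket_fast_alt]
  set Gh := PySem.Int.floordiv (H + ph - 1) ph with hGh
  set Gw := PySem.Int.floordiv (W + pw - 1) pw with hGw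
  have hGhspec := (PySem.Int.floordiv_eq_iff_of_pos hph0).mp hGh.symm
  have hGwspec := (PySem.Int.floordiv_eq_iff_of_pos hpw0).mp hGw.symm
  have hHle : H ≤ Gh * ph := by nlinarith [hGhspec.2]
  have hWle : W ≤ Gw * pw := by nlinarith [hGwspec.2]
  have hGh1 : 1 ≤ Gh := by
    rw [hGh]; exact (PySem.Int.le_floordiv_iff_mul_le hph0).mpr (by nlinarith)
  have hGw1 : 1 ≤ Gw := by
    rw [hGw]; exact (PySem.Int.le_floordiv_iff_mul_le hpw0).mpr (by nlinarith)
  have hGh0 : (0 : Int) ≤ Gh := by omega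
  have hGw0 : (0 : Int) ≤ Gw := by omega
  rw [if_neg (by push_neg; exact ⟨by omega, by omega⟩)]
  -- ===== A side: the nested fold is a flatMap of blocks plus a map of sizes
  have hrows : ∀ (gh gw : Int) (st : List Int × List Int),
      List.foldl (fun (st : List Int × List Int) i =>
          (List.foldl (fun g j => g ++ [i * W + j]) st.1
            (PySem.List.pyRange (gw * pw) (min (gw * pw + pw) W) 1), st.2))
        st (PySem.List.pyRange (gh * ph) (min (gh * ph + ph) H) 1)
      = (st.1 ++ pvBlock H W ph pw gh gw, st.2) := by
    intro gh gw st
    rw [pvPairFold _ _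
      (fun i => (PySem.List.pyRange (gw * pw) (min (gw * pw + pw) W) 1).map (fun j => i * W + j))
      (fun _ => ([] : List Int))
      (by intro st x; rw [PySem.List.foldl_append_singleton_eq_map]; simp) st]
    simp [pvBlock]
  have hgw : ∀ (gh : Int) (st : List Int × List Int),
      List.foldl (fun (st : List Int × List Int) gw =>
          List.foldl (fun (st : List Int × List Int) i =>
              (List.foldl (fun g j => g ++ [i * W + j]) st.1
                (PySem.List.pyRange (gw * pw) (min (gw * pw + pw) W) 1), st.2))
            (st.1, st.2 ++ [(min (gh * ph + ph) H - gh * ph) * (min (gw * pw + pw) W - gw * pw)])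
            (PySem.List.pyRange (gh * ph) (min (gh * ph + ph) H) 1))
        st (PySem.List.pyRange 0 Gw 1)
      = (st.1 ++ (PySem.List.pyRange 0 Gw 1).flatMap (fun gw => pvBlock H W ph pw gh gw),
         st.2 ++ (PySem.List.pyRange 0 Gw 1).flatMap (fun gw =>
           [(min (gh * ph + ph) H - gh * ph) * (min (gw * pw + pw) W - gw * pw)])) := by
    intro gh st
    exact pvPairFold _ _
      (fun gw => pvBlock H W ph pw gh gw)
      (fun gw => [(min (gh * ph + ph) H - gh * ph) * (min (gw * pw + pw) W - gw * pw)])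
      (by intro st gw; rw [hrows]) st
  have houter :
      List.foldl (fun (st : List Int × List Int) gh =>
          List.foldl (fun (st : List Int × List Int) gw =>
              List.foldl (fun (st : List Int × List Int) i =>
                  (List.foldl (fun g j => g ++ [i * W + j]) st.1
                    (PySem.List.pyRange (gw * pw) (min (gw * pw + pw) W) 1), st.2))
                (st.1, st.2 ++ [(min (gh * ph + ph) H - gh * ph) * (min (gw * pw + pw) W - gw * pw)])
                (PySem.List.pyRange (gh * ph) (min (gh * ph + ph) H) 1))
            st (PySem.List.pyRange 0 Gw 1))
        (([], []) : List Int × List Int) (PySem.List.pyRange 0 Gh 1)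
      = ((PySem.List.pyRange 0 Gh 1).flatMap (fun gh =>
           (PySem.List.pyRange 0 Gw 1).flatMap (fun gw => pvBlock H W ph pw gh gw)),
         (PySem.List.pyRange 0 Gh 1).flatMap (fun gh =>
           (PySem.List.pyRange 0 Gw 1).flatMap (fun gw =>
             [(min (gh * ph + ph) H - gh * ph) * (min (gw * pw + pw) W - gw * pw)]))) := by
    rw [pvPairFold _ _
      (fun gh => (PySem.List.pyRange 0 Gw 1).flatMap (fun gw => pvBlock H W ph pw gh gw))
      (fun gh => (PySem.List.pyRange 0 Gw 1).flatMap (fun gw =>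
        [(min (gh * ph + ph) H - gh * ph) * (min (gw * pw + pw) W - gw * pw)]))
      (by intro st gh; rw [hgw]) (([], []) : List Int × List Int)]
    simp
  rw [houter]
  -- ===== B side: bucket binning
  have hkeybound : ∀ i j : Int, 0 ≤ i → i < H → 0 ≤ j → j < W →
      (0 ≤ PySem.Int.floordiv i ph ∧ PySem.Int.floordiv i ph < Gh) ∧
      (0 ≤ PySem.Int.floordiv j pw ∧ PySem.Int.floordiv j pw < Gw) := by
    intro i j hi0 hi1 hj0 hj1
    refine ⟨⟨?_, ?_⟩, ?_, ?_⟩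
    · exact (PySem.Int.le_floordiv_iff_mul_le hph0).mpr (by nlinarith)
    · exact (PySem.Int.floordiv_lt_iff_lt_mul hph0).mpr (by nlinarith)
    · exact (PySem.Int.le_floordiv_iff_mul_le hpw0).mpr (by nlinarith)
    · exact (PySem.Int.floordiv_lt_iff_lt_mul hpw0).mpr (by nlinarith)
  have hstep :
      ((PySem.List.pyRange 0 H 1).flatMap (fun i => (PySem.List.pyRange 0 W 1).map (fun j => (i, j)))).foldl
        (fun bs (x : Int × Int) => PySem.List.pySetD bs (PySem.Int.floordiv x.1 ph * Gw + PySem.Int.floordiv x.2 pw)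
          (PySem.List.pyGetD bs (PySem.Int.floordiv x.1 ph * Gw + PySem.Int.floordiv x.2 pw) [] ++ [x.1 * W + x.2]))
        ((PySem.List.pyRange 0 (Gh * Gw) 1).map (fun _ => ([] : List Int)))
      = List.foldl (fun bins i => List.foldl (fun bins j =>
            PySem.List.pySetD bins (PySem.Int.floordiv i ph * Gw + PySem.Int.floordiv j pw)
              (PySem.List.pyGetD bins (PySem.Int.floordiv i ph * Gw + PySem.Int.floordiv j pw) [] ++ [i * W + j]))
            bins (PySem.List.pyRange 0 W 1))
          ((PySem.List.pyRange 0 (Gh * Gw) 1).map (fun _ => ([] : List Int))) (PySem.List.pyRange 0 H 1) := by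
    rw [List.foldl_flatMap]
    simp only [List.foldl_map]
  have hmem' : ∀ x ∈ ((PySem.List.pyRange 0 H 1).flatMap (fun i => (PySem.List.pyRange 0 W 1).map (fun j => (i, j)))),
      0 ≤ PySem.Int.floordiv x.1 ph * Gw + PySem.Int.floordiv x.2 pw ∧
      PySem.Int.floordiv x.1 ph * Gw + PySem.Int.floordiv x.2 pw
        < (((PySem.List.pyRange 0 (Gh * Gw) 1).map (fun _ => ([] : List Int))).length : Int) := by
    intro x hx
    simp only [List.mem_flatMap, List.mem_map, PySem.List.mem_pyRange_one] at hx
    obtain ⟨i, ⟨hi0, hi1⟩, j, ⟨hj0, hj1⟩, rfl⟩ := hx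
    have hb := hkeybound i j hi0 hi1 hj0 hj1
    have hlen : (((PySem.List.pyRange 0 (Gh * Gw) 1).map (fun _ => ([] : List Int))).length : Int) = Gh * Gw := by
      simp [PySem.List.length_pyRange_one, Int.toNat_of_nonneg (by positivity : (0:Int) ≤ Gh * Gw)]
    rw [hlen]
    constructor
    · have := mul_nonneg hb.1.1 hGw0
      have := hb.2.1
      simp only []
      linarith
    · have h1 : PySem.Int.floordiv i ph ≤ Gh - 1 := by omega
      have h2 := mul_le_mul_of_nonneg_right h1 hGw0
      have := hb.2.2
      simp only []
      nlinarith
  have hbins :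
      List.foldl (fun bins i => List.foldl (fun bins j =>
          PySem.List.pySetD bins (PySem.Int.floordiv i ph * Gw + PySem.Int.floordiv j pw)
            (PySem.List.pyGetD bins (PySem.Int.floordiv i ph * Gw + PySem.Int.floordiv j pw) [] ++ [i * W + j]))
          bins (PySem.List.pyRange 0 W 1))
        ((PySem.List.pyRange 0 (Gh * Gw) 1).map (fun _ => ([] : List Int))) (PySem.List.pyRange 0 H 1)
      = (List.range (Gh * Gw).toNat).map (fun b : Nat =>
          (((PySem.List.pyRange 0 H 1).flatMap (fun i => (PySem.List.pyRange 0 W 1).map (fun j => (i, j)))).filter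
            (fun x : Int × Int => decide (PySem.Int.floordiv x.1 ph * Gw + PySem.Int.floordiv x.2 pw = (b : Int)))).map
            (fun x : Int × Int => x.1 * W + x.2)) := by
    rw [← hstep]
    rw [pvBucketFold (fun x : Int × Int => PySem.Int.floordiv x.1 ph * Gw + PySem.Int.floordiv x.2 pw)
      (fun x : Int × Int => x.1 * W + x.2) _ _ hmem']
    apply List.ext_getElem
    · simp [PySem.List.length_pyRange_one]
    intro b h1 h2
    rw [List.getElem_mapIdx]
    simp only [List.length_map] at h1
    simp [List.getElem_range, ← List.map_eq_flatMap]
  have hbucket : ∀ b : Nat, b < (Gh * Gw).toNat →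
      ((((PySem.List.pyRange 0 H 1).flatMap (fun i => (PySem.List.pyRange 0 W 1).map (fun j => (i, j)))).filter
        (fun x : Int × Int => decide (PySem.Int.floordiv x.1 ph * Gw + PySem.Int.floordiv x.2 pw = (b : Int)))).map
        (fun x : Int × Int => x.1 * W + x.2))
      = pvBlock H W ph pw ((b / Gw.toNat : Nat) : Int) ((b % Gw.toNat : Nat) : Int) := by
    intro b hb
    have hGwt : 0 < Gw.toNat := by omega
    have hcastGw : ((Gw.toNat : Nat) : Int) = Gw := Int.toNat_of_nonneg hGw0
    have hdecomp : ((b / Gw.toNat : Nat) : Int) * Gw + ((b % Gw.toNat : Nat) : Int) = (b : Int) := by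
      have h2 : ((b / Gw.toNat * Gw.toNat + b % Gw.toNat : Nat) : Int) = (b : Int) := by
        rw [Nat.div_add_mod']
      rw [Nat.cast_add, Nat.cast_mul, hcastGw] at h2
      exact h2
    have hgw2 : ((b % Gw.toNat : Nat) : Int) < Gw := by
      have h := Nat.mod_lt b hGwt
      calc ((b % Gw.toNat : Nat) : Int) < ((Gw.toNat : Nat) : Int) := by exact_mod_cast h
        _ = Gw := hcastGw
    have hghZ0 : (0 : Int) ≤ ((b / Gw.toNat : Nat) : Int) := Int.natCast_nonneg _
    have hgwZ0 : (0 : Int) ≤ ((b % Gw.toNat : Nat) : Int) := Int.natCast_nonneg _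
    calc (((PySem.List.pyRange 0 H 1).flatMap (fun i => (PySem.List.pyRange 0 W 1).map (fun j => (i, j)))).filter
          (fun x : Int × Int => decide (PySem.Int.floordiv x.1 ph * Gw + PySem.Int.floordiv x.2 pw = (b : Int)))).map
          (fun x : Int × Int => x.1 * W + x.2)
        = ((PySem.List.pyRange 0 H 1).flatMap (fun i => ((PySem.List.pyRange 0 W 1).map (fun j => (i, j))).filter
            (fun x : Int × Int => decide (PySem.Int.floordiv x.1 ph * Gw + PySem.Int.floordiv x.2 pw = (b : Int))))).map
            (fun x : Int × Int => x.1 * W + x.2) := by rw [List.filter_flatMap]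
      _ = ((PySem.List.pyRange 0 H 1).flatMap (fun i =>
            if decide (PySem.Int.floordiv i ph = ((b / Gw.toNat : Nat) : Int)) then
              ((PySem.List.pyRange 0 W 1).filter (fun j => decide (PySem.Int.floordiv j pw = ((b % Gw.toNat : Nat) : Int)))).map
                (fun j => (i, j))
            else [])).map (fun x : Int × Int => x.1 * W + x.2) := by
          congr 1
          apply List.flatMap_congr
          intro i hi
          rw [PySem.List.mem_pyRange_one] at hi
          rw [List.filter_map]
          by_cases hgh : PySem.Int.floordiv i ph = ((b / Gw.toNat : Nat) : Int)
          · rw [if_pos (by simp [hgh])]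
            congr 1
            apply List.filter_congr
            intro j hj
            rw [PySem.List.mem_pyRange_one] at hj
            have hk := hkeybound i j hi.1 hi.2 hj.1 hj.2
            have hiff := pvGridUnique Gw (PySem.Int.floordiv i ph) ((b / Gw.toNat : Nat) : Int)
              (PySem.Int.floordiv j pw) ((b % Gw.toNat : Nat) : Int) hk.2.1 hk.2.2 hgwZ0 hgw2
            simp only [Function.comp_apply, Function.comp]
            rw [show ((b : Int)) = ((b / Gw.toNat : Nat) : Int) * Gw + ((b % Gw.toNat : Nat) : Int) from hdecomp.symm]
            simp only [decide_eq_decide]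
            rw [hiff]
            exact ⟨fun h => h.2, fun h => ⟨hgh, h⟩⟩
          · rw [if_neg (by simpa using hgh)]
            rw [List.filter_eq_nil_iff.mpr ?_, List.map_nil]
            intro j hj
            rw [PySem.List.mem_pyRange_one] at hj
            have hk := hkeybound i j hi.1 hi.2 hj.1 hj.2
            have hiff := pvGridUnique Gw (PySem.Int.floordiv i ph) ((b / Gw.toNat : Nat) : Int)
              (PySem.Int.floordiv j pw) ((b % Gw.toNat : Nat) : Int) hk.2.1 hk.2.2 hgwZ0 hgw2
            simp only [Function.comp_apply, Function.comp]
            rw [show ((b : Int)) = ((b / Gw.toNat : Nat) : Int) * Gw + ((b % Gw.toNat : Nat) : Int) from hdecomp.symm]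
            simp only [decide_eq_true_eq]
            rw [hiff]
            exact fun h => hgh h.1
      _ = (PySem.List.pyRange 0 H 1).flatMap (fun i =>
            if decide (PySem.Int.floordiv i ph = ((b / Gw.toNat : Nat) : Int)) then
              ((PySem.List.pyRange 0 W 1).filter (fun j => decide (PySem.Int.floordiv j pw = ((b % Gw.toNat : Nat) : Int)))).map
                (fun j => i * W + j)
            else []) := by
          rw [List.map_flatMap]
          apply List.flatMap_congr
          intro i _
          rw [apply_ite (List.map (fun x : Int × Int => x.1 * W + x.2))]
          rw [List.map_map]
          split_ifs with hc
          · exact List.map_congr_left (fun j _ => rfl)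
          · rfl
      _ = ((PySem.List.pyRange 0 H 1).filter (fun i => decide (PySem.Int.floordiv i ph = ((b / Gw.toNat : Nat) : Int)))).flatMap
            (fun i => ((PySem.List.pyRange 0 W 1).filter (fun j => decide (PySem.Int.floordiv j pw = ((b % Gw.toNat : Nat) : Int)))).map
              (fun j => i * W + j)) := pvFlatMapIf _ _ _
      _ = pvBlock H W ph pw ((b / Gw.toNat : Nat) : Int) ((b % Gw.toNat : Nat) : Int) := by
          rw [pvFilterDiv' ph _ H hph0 hghZ0 (by omega), pvFilterDiv' pw _ W hpw0 hgwZ0 (by omega), pvBlock]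
  have hbins2 :
      List.foldl (fun bins i => List.foldl (fun bins j =>
          PySem.List.pySetD bins (PySem.Int.floordiv i ph * Gw + PySem.Int.floordiv j pw)
            (PySem.List.pyGetD bins (PySem.Int.floordiv i ph * Gw + PySem.Int.floordiv j pw) [] ++ [i * W + j]))
          bins (PySem.List.pyRange 0 W 1))
        ((PySem.List.pyRange 0 (Gh * Gw) 1).map (fun _ => ([] : List Int))) (PySem.List.pyRange 0 H 1)
      = (PySem.List.pyRange 0 Gh 1).flatMap (fun gh => (PySem.List.pyRange 0 Gw 1).map (fun gw => pvBlock H W ph pw gh gw)) := by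
    rw [hbins]
    calc (List.range (Gh * Gw).toNat).map (fun b : Nat =>
          ((((PySem.List.pyRange 0 H 1).flatMap (fun i => (PySem.List.pyRange 0 W 1).map (fun j => (i, j)))).filter
            (fun x : Int × Int => decide (PySem.Int.floordiv x.1 ph * Gw + PySem.Int.floordiv x.2 pw = (b : Int)))).map
            (fun x : Int × Int => x.1 * W + x.2)))
        = (List.range (Gh.toNat * Gw.toNat)).map (fun t => pvBlock H W ph pw ((t / Gw.toNat : Nat) : Int) ((t % Gw.toNat : Nat) : Int)) := by
          rw [Int.toNat_mul hGh0 hGw0]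
          apply List.map_congr_left
          intro t ht
          rw [List.mem_range] at ht
          exact hbucket t (by rw [Int.toNat_mul hGh0 hGw0]; exact ht)
      _ = (List.range Gh.toNat).flatMap (fun a => (List.range Gw.toNat).map (fun c => pvBlock H W ph pw ((a : Nat) : Int) ((c : Nat) : Int))) :=
          (pvGridNat Gh.toNat Gw.toNat (fun a c => pvBlock H W ph pw ((a : Nat) : Int) ((c : Nat) : Int))).symm
      _ = (PySem.List.pyRange 0 Gh 1).flatMap (fun gh => (PySem.List.pyRange 0 Gw 1).map (fun gw => pvBlock H W ph pw gh gw)) := by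
          rw [pvPyRangeZero Gh, pvPyRangeZero Gw]
          simp only [← List.map_eq_flatMap, List.flatMap_map, List.map_map]
          rfl
  rw [hbins2]
  have hlenblock : ∀ gh gw : Int, 0 ≤ gh → gh < Gh → 0 ≤ gw → gw < Gw →
      (((pvBlock H W ph pw gh gw).length : Nat) : Int) = (min (gh * ph + ph) H - gh * ph) * (min (gw * pw + pw) W - gw * pw) := by
    intro gh gw h1 h2 h3 h4
    have hh : gh * ph ≤ H := by nlinarith [mul_le_mul_of_nonneg_right (show gh ≤ Gh - 1 by omega) (le_of_lt hph0)]
    have hw : gw * pw ≤ W := by nlinarith [mul_le_mul_of_nonneg_right (show gw ≤ Gw - 1 by omega) (le_of_lt hpw0)]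
    have e1 : (0 : Int) ≤ min (gh * ph + ph) H - gh * ph := by
      have : gh * ph ≤ min (gh * ph + ph) H := le_min (by linarith) hh
      omega
    have e2 : (0 : Int) ≤ min (gw * pw + pw) W - gw * pw := by
      have : gw * pw ≤ min (gw * pw + pw) W := le_min (by linarith) hw
      omega
    rw [pvBlock, List.length_flatMap]
    simp only [List.length_map, PySem.List.length_pyRange_one]
    rw [List.map_const', List.sum_replicate_nat, PySem.List.length_pyRange_one]
    push_cast
    rw [Int.toNat_of_nonneg e1, Int.toNat_of_nonneg e2]
  have hflat :
      ((PySem.List.pyRange 0 Gh 1).flatMap (fun gh => (PySem.List.pyRange 0 Gw 1).map (fun gw => pvBlock H W ph pw gh gw))).flatten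
      = (PySem.List.pyRange 0 Gh 1).flatMap (fun gh => (PySem.List.pyRange 0 Gw 1).flatMap (fun gw => pvBlock H W ph pw gh gw)) := by
    rw [pvFlattenFlatMap]
    apply List.flatMap_congr
    intro gh _
    exact List.flatMap_def.symm
  have hszB :
      ((PySem.List.pyRange 0 Gh 1).flatMap (fun gh => (PySem.List.pyRange 0 Gw 1).map (fun gw => pvBlock H W ph pw gh gw))).map
        (fun bk => ((bk.length : Nat) : Int))
      = (PySem.List.pyRange 0 Gh 1).flatMap (fun gh => (PySem.List.pyRange 0 Gw 1).flatMap (fun gw =>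
          [(min (gh * ph + ph) H - gh * ph) * (min (gw * pw + pw) W - gw * pw)])) := by
    rw [List.map_flatMap]
    apply List.flatMap_congr
    intro gh hgh
    rw [PySem.List.mem_pyRange_one] at hgh
    rw [List.map_map, ← List.map_eq_flatMap]
    apply List.map_congr_left
    intro gw hgw
    rw [PySem.List.mem_pyRange_one] at hgw
    simp only [Function.comp_apply, Function.comp]
    exact hlenblock gh gw hgh.1 hgh.2 hgw.1 hgw.2
  rw [pvBinsFold _ [] [] [0] 0 rfl, pvOffsetsFold, PySem.List.foldl_append_eq_flatMap]
  simp only [List.nil_append]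
  rw [hflat, hszB]

-- ===== VERDICT (by name: the statement is the Claim_ definition above) =====
theorem build_grid_gather_index_and_bucket_fast_spec : Claim_equal_build_grid_gather_index_and_bucket_fast := by
  intro H W pool_h pool_w seqlen _ hpre
  unfold Spec_build_grid_gather_index_and_bucket_fast
  rcases hpre with ⟨h1, h2, h3, h4⟩ | ⟨hH0, hW0, hph0, hpw0, hcase⟩
  · exact pvEquiv H W pool_h pool_w seqlen h1 h2 h3 h4
  · have hg : PySem.Int.floordiv (H + pool_h - 1) pool_h ≤ 0 ∨
        PySem.Int.floordiv (W + pool_w - 1) pool_w ≤ 0 := by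
      rcases hcase with (⟨ha, hb⟩ | ⟨ha, hb⟩) | (⟨ha, hb⟩ | ⟨ha, hb⟩)
      · left
        have := (PySem.Int.floordiv_lt_iff_lt_mul (a := H + pool_h - 1) (b := pool_h) (q := 1) (by omega : (0:Int) < pool_h)).mpr (by linarith [one_mul pool_h])
        omega
      · left
        rw [pvFloordivNeg _ _ (by omega)]
        have := (PySem.Int.floordiv_lt_iff_lt_mul (a := -(H + pool_h - 1)) (b := -pool_h) (q := 1) (by omega : (0:Int) < -pool_h)).mpr (by linarith [one_mul (-pool_h)])
        omega
      · right
        have := (PySem.Int.floordiv_lt_iff_lt_mul (a := W + pool_w - 1) (b := pool_w) (q := 1) (by omega : (0:Int) < pool_w)).mpr (by linarith [one_mul pool_w])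
        omega
      · right
        rw [pvFloordivNeg _ _ (by omega)]
        have := (PySem.Int.floordiv_lt_iff_lt_mul (a := -(W + pool_w - 1)) (b := -pool_w) (q := 1) (by omega : (0:Int) < -pool_w)).mpr (by linarith [one_mul (-pool_w)])
        omega
    rw [pvAEmptyCase H W pool_h pool_w seqlen hg]
    simp only [build_grid_gather_index_and_bucket_fast_alt]
    rw [if_pos hg]
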